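-- pv_equiv track=rewrite | github.com/though14/CEM_Agent_G2OP | src/MATPOWER/T_04_MATPOWER_Analysis.py | analyze_pattern
-- ===== SOURCE A (Python) =====
-- def analyze_pattern(pattern):
--     unique_patterns = {}
--     pattern_counts = {}
--     order_of_changes = []
--     base_pattern = None
--
--     for row in pattern:
--         pattern_str = str(row)
--         if pattern_str not in unique_patterns:
--             if base_pattern is None:
--                 pattern_name = 'b'
--                 base_pattern = pattern_str
--             else:
--                 pattern_name = 't' + str(len(unique_patterns))
--             unique_patterns[pattern_str] = pattern_name
--             pattern_counts[pattern_name] = 1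
--             order_of_changes.append(pattern_name)
--         else:
--             pattern_name = unique_patterns[pattern_str]
--             if order_of_changes[-1] != pattern_name:
--                 pattern_counts[pattern_name] += 1
--                 order_of_changes.append(pattern_name)
--             else :
--                 pattern_counts[pattern_name] +=1
--
--     # Count occurrences of the base pattern
--     base_pattern_count = pattern_counts.get('b', 0)
--
--     return unique_patterns, pattern_counts, order_of_changes, base_pattern_count
-- ===== SOURCE B (Python) =====
-- def analyze_pattern(pattern):
--     # Pass 1: assign a name to each distinct row ('b' first, then 't1', 't2', ...)
--     # and record the resolved name of every row.
--     unique_patterns = {}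
--     name_seq = []
--     for row in pattern:
--         key = str(row)
--         if key in unique_patterns:
--             name = unique_patterns[key]
--         else:
--             name = 'b' if not unique_patterns else 't' + str(len(unique_patterns))
--             unique_patterns[key] = name
--         name_seq.append(name)
--
--     # Derived pass 2: total occurrences of each name (first-appearance key order).
--     pattern_counts = {}
--     for name in name_seq:
--         pattern_counts[name] = pattern_counts.get(name, 0) + 1
--
--     # Derived pass 3: run-length-compress the name sequence.
--     order_of_changes = []
--     for name in name_seq:
--         if not order_of_changes or order_of_changes[-1] != name:
--             order_of_changes.append(name)
--
--     return unique_patterns, pattern_counts, order_of_changes, pattern_counts.get('b', 0)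
-- ===== Notes on version B (the rewrite author's own statement) =====
-- stated objective: simpler
-- what changed: A's single interleaved loop (inline run-change test on order_of_changes[-1], per-branch count updates and a base_pattern sentinel variable) is replaced by one naming pass that records each row's resolved name, followed by three independent derived passes: a plain occurrence counter, a run-length compression of the name sequence, and a dict lookup for the base count.
import Mathlib
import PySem

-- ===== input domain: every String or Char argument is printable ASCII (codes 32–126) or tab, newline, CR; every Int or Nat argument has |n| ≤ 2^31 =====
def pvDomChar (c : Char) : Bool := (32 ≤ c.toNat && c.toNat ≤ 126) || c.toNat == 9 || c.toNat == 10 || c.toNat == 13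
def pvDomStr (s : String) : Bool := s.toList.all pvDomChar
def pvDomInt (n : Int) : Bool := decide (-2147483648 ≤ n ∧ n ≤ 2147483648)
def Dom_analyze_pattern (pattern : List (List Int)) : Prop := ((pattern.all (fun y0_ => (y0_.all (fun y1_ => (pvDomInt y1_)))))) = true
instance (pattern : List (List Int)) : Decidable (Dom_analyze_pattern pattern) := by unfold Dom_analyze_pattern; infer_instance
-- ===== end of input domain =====

-- ===== PORT A =====
-- B replaces A's single interleaved loop (inline run-tracking, counting and base flag) by one
-- naming pass plus three separate derived passes (counter, run-length compression, lookup); objective: simpler.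

-- ===== PORT A =====
-- str(row) for a Python list of ints: "[a, b, ...]"
def rowStr (row : List Int) : String := "[" ++ PySem.Str.join ", " (row.map PySem.Int.toStr) ++ "]"

-- one iteration of A's loop; state = (unique_patterns, pattern_counts, order_of_changes, base_pattern)
-- counts[name] += 1 is ported as modify name 0 (·+1) and unique_patterns[pattern_str] as (get? …).getD "":
-- both lookups are on keys present in the dict, so the defaults are never used (Python raises nowhere here)
def stepA (st : PySem.Dict String String × PySem.Dict String Int × List String × Option String)
    (row : List Int) : PySem.Dict String String × PySem.Dict String Int × List String × Option String :=
  match st with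
  | (up, counts, order, base) =>
    let pstr := rowStr row
    if up.contains pstr = false then
      match base with
      | none => (up.insert pstr "b", counts.insert "b" 1, order ++ ["b"], some pstr)
      | some b =>
          let name := "t" ++ PySem.Int.toStr (up.size : Int)
          (up.insert pstr name, counts.insert name 1, order ++ [name], some b)
    else
      let name := (up.get? pstr).getD ""
      if PySem.List.pyGet? order (-1) ≠ some name then
        (up, counts.modify name 0 (· + 1), order ++ [name], base)
      else
        (up, counts.modify name 0 (· + 1), order, base)

def analyze_pattern (pattern : List (List Int)) : (List (String × String)) × (List (String × Int)) × List String × Int :=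
  let st := pattern.foldl stepA (PySem.Dict.empty, PySem.Dict.empty, [], none)
  (st.1.items, st.2.1.items, st.2.2.1, st.2.1.getD "b" 0)

-- ===== PORT B =====
-- pass 1: resolve each row's name, building (unique_patterns, name_seq)
def nameStep (st : PySem.Dict String String × List String) (row : List Int) :
    PySem.Dict String String × List String :=
  let key := rowStr row
  match st.1.get? key with
  | some name => (st.1, st.2 ++ [name])
  | none =>
      let name := if st.1.size = 0 then "b" else "t" ++ PySem.Int.toStr (st.1.size : Int)
      (st.1.insert key name, st.2 ++ [name])

-- pass 2: pattern_counts[name] = pattern_counts.get(name, 0) + 1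
def countStep (d : PySem.Dict String Int) (name : String) : PySem.Dict String Int :=
  d.insert name (d.getD name 0 + 1)

-- pass 3: run-length compression of name_seq
def collapseStep (acc : List String) (name : String) : List String :=
  if acc = [] ∨ PySem.List.pyGet? acc (-1) ≠ some name then acc ++ [name] else acc

def analyze_pattern_alt (pattern : List (List Int)) : (List (String × String)) × (List (String × Int)) × List String × Int :=
  let st := pattern.foldl nameStep (PySem.Dict.empty, [])
  let counts := st.2.foldl countStep PySem.Dict.empty
  let order := st.2.foldl collapseStep []
  (st.1.items, counts.items, order, counts.getD "b" 0)

-- ===== PRECONDITION & SPEC =====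
def Spec_analyze_pattern (pattern : List (List Int)) (out : (List (String × String)) × (List (String × Int)) × List String × Int) : Prop := out = analyze_pattern_alt pattern
instance (pattern : List (List Int)) (out : (List (String × String)) × (List (String × Int)) × List String × Int) : Decidable (Spec_analyze_pattern pattern out) := by unfold Spec_analyze_pattern; infer_instance

-- ===== CLAIM (what is proved, stated in full; the proofs are below) =====
def Claim_equal_analyze_pattern : Prop := ∀ (pattern : List (List Int)), Dom_analyze_pattern pattern → Spec_analyze_pattern pattern (analyze_pattern pattern)

-- ===== LEMMAS AND PROOFS =====

-- str(n) for nonnegative n, as a plain recursion (proof-side model of Nat.toDigits 10)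
def myD (n : Nat) : List Char :=
  if _h : n < 10 then [Nat.digitChar n]
  else myD (n / 10) ++ [Nat.digitChar (n % 10)]
decreasing_by exact Nat.div_lt_self (by omega) (by norm_num)

lemma myD_ne_nil (n : Nat) : myD n ≠ [] := by
  unfold myD; split <;> simp

lemma toDigitsCore_eq_myD : ∀ (f n : Nat) (acc : List Char), n < f →
    Nat.toDigitsCore 10 f n acc = myD n ++ acc := by
  intro f
  induction f with
  | zero => intro n acc h; omega
  | succ f ih =>
    intro n acc h
    rw [Nat.toDigitsCore]
    by_cases h10 : n < 10
    · have : n / 10 = 0 := Nat.div_eq_of_lt h10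
      simp [this, myD, h10, Nat.mod_eq_of_lt h10]
    · have hne : ¬ n / 10 = 0 := by
        intro h0; exact h10 (by omega : n < 10)
      have hlt : n / 10 < f := by
        have := Nat.div_lt_self (by omega : 0 < n) (by norm_num : 1 < 10)
        omega
      simp only [hne, if_false]
      rw [ih (n / 10) _ hlt]
      conv_rhs => rw [myD]
      simp [h10]

lemma toDigits_eq_myD (n : Nat) : Nat.toDigits 10 n = myD n := by
  have := toDigitsCore_eq_myD (n + 1) n [] (by omega)
  simpa [Nat.toDigits] using this

lemma digitChar_inj_lt (a b : Nat) (ha : a < 10) (hb : b < 10) (h : Nat.digitChar a = Nat.digitChar b) : a = b := by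
  have key : ∀ x y : Fin 10, Nat.digitChar x.val = Nat.digitChar y.val → x = y := by decide
  have := key ⟨a, ha⟩ ⟨b, hb⟩ h
  exact congrArg Fin.val this

lemma myD_lt {n : Nat} (h : n < 10) : myD n = [Nat.digitChar n] := by rw [myD]; simp [h]

lemma myD_ge {n : Nat} (h : ¬ n < 10) : myD n = myD (n / 10) ++ [Nat.digitChar (n % 10)] := by
  conv_lhs => rw [myD]
  simp [h]

lemma myD_inj : ∀ a b : Nat, myD a = myD b → a = b := by
  intro a
  induction a using Nat.strong_induction_on with
  | _ a ih =>
    intro b h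
    by_cases ha : a < 10 <;> by_cases hb : b < 10
    · rw [myD_lt ha, myD_lt hb] at h
      simp at h
      exact digitChar_inj_lt a b ha hb h
    · rw [myD_lt ha, myD_ge hb] at h
      have hl := congrArg List.length h
      have hne : (myD (b / 10)).length ≠ 0 := by simpa [List.length_eq_zero_iff] using myD_ne_nil (b / 10)
      simp only [List.length_append, List.length_cons, List.length_nil] at hl
      omega
    · rw [myD_ge ha, myD_lt hb] at h
      have hl := congrArg List.length h
      have hne : (myD (a / 10)).length ≠ 0 := by simpa [List.length_eq_zero_iff] using myD_ne_nil (a / 10)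
      simp only [List.length_append, List.length_cons, List.length_nil] at hl
      omega
    · rw [myD_ge ha, myD_ge hb] at h
      have hlen : ([Nat.digitChar (a % 10)] : List Char).length = ([Nat.digitChar (b % 10)] : List Char).length := by simp
      obtain ⟨h1, h2⟩ := List.append_inj' h hlen
      have hd : a / 10 = b / 10 := ih (a / 10) (Nat.div_lt_self (by omega) (by norm_num)) _ h1
      have hm : a % 10 = b % 10 := by
        have := List.head_eq_of_cons_eq h2
        exact digitChar_inj_lt _ _ (Nat.mod_lt _ (by norm_num)) (Nat.mod_lt _ (by norm_num)) this
      omega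

lemma toStr_natCast_inj (a b : Nat) (h : PySem.Int.toStr (a : Int) = PySem.Int.toStr (b : Int)) : a = b := by
  have h' : PySem.Int.toChars (a : Int) = PySem.Int.toChars (b : Int) := by
    have := congrArg String.toList h
    simpa [PySem.Int.toList_toStr] using this
  simp only [PySem.Int.toChars] at h'
  have hna : ¬ ((a : Int) < 0) := by omega
  have hnb : ¬ ((b : Int) < 0) := by omega
  simp [hna, hnb, toDigits_eq_myD] at h'
  exact myD_inj a b h'

lemma tName_ne_b (a : Nat) : "t" ++ PySem.Int.toStr (a : Int) ≠ "b" := by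
  intro h
  have := congrArg String.toList h
  simp only [String.toList_append, PySem.Int.toList_toStr] at this
  simp at this

-- the loop 'for name in name_seq: ...' of pass 3, as a function of the whole sequence
def runComp (s : List String) : List String := s.foldl collapseStep []

lemma runComp_append (s : List String) (n : String) :
    runComp (s ++ [n]) = collapseStep (runComp s) n := by
  simp [runComp, List.foldl_append]

lemma mem_foldl_collapse (s : List String) : ∀ (acc : List String) (x : String),
    x ∈ s.foldl collapseStep acc → x ∈ acc ∨ x ∈ s := by
  induction s with
  | nil => intro acc x h; simp at h; exact Or.inl h
  | cons a s ih =>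
    intro acc x h
    rcases ih _ x h with h' | h'
    · unfold collapseStep at h'
      split at h'
      · rcases List.mem_append.mp h' with h'' | h''
        · exact Or.inl h''
        · simp at h''; subst h''; exact Or.inr (by simp)
      · exact Or.inl h'
    · exact Or.inr (by simp [h'])

lemma mem_runComp (s : List String) (x : String) (h : x ∈ runComp s) : x ∈ s := by
  rcases mem_foldl_collapse s [] x h with h' | h'
  · simp at h'
  · exact h'

-- the invariant tying A's loop state to B's pass-1 state
def StInv (st : PySem.Dict String String × PySem.Dict String Int × List String × Option String)
    (names : PySem.Dict String String) (seq : List String) : Prop :=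
  st.1 = names ∧
  st.2.1 = PySem.Dict.counter seq ∧
  st.2.2.1 = runComp seq ∧
  (st.2.2.2 = none ↔ names.items = []) ∧
  (∀ x ∈ seq, x ∈ names.values) ∧
  (∀ j : Nat, ("t" ++ PySem.Int.toStr (j : Int)) ∈ names.values → j < names.size) ∧
  names.keys.Nodup

lemma counter_snoc_fresh (seq : List String) (n : String) (h : n ∉ seq) :
    PySem.Dict.counter (seq ++ [n]) = (PySem.Dict.counter seq).insert n 1 := by
  rw [PySem.Dict.counter_append_singleton]
  show (PySem.Dict.counter seq).insert n ((PySem.Dict.counter seq).getD n 0 + 1) = _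
  rw [PySem.Dict.getD_counter]
  simp [List.count_eq_zero.mpr h]

lemma collapseStep_eq (acc : List String) (n : String) :
    collapseStep acc n = if PySem.List.pyGet? acc (-1) ≠ some n then acc ++ [n] else acc := by
  unfold collapseStep
  by_cases he : acc = []
  · subst he; simp [PySem.List.pyGet?_neg_one]
  · simp [he]

lemma runComp_snoc_fresh (seq : List String) (n : String) (h : n ∉ seq) :
    runComp (seq ++ [n]) = runComp seq ++ [n] := by
  rw [runComp_append, collapseStep_eq, if_pos]
  rw [PySem.List.pyGet?_neg_one]
  intro hlast
  exact h (mem_runComp seq n (List.mem_of_getLast? hlast))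

lemma values_insert_fresh (d : PySem.Dict String String) (k v : String)
    (hc : d.contains k = false) : (d.insert k v).values = d.values ++ [v] := by
  simp [PySem.Dict.values, PySem.Dict.items_insert_of_not_contains d v hc]

lemma mem_values_of_get? (d : PySem.Dict String String) (k v : String)
    (h : d.get? k = some v) : v ∈ d.values := by
  have := PySem.Dict.mem_items_of_get?_eq_some d h
  simp only [PySem.Dict.values]
  exact List.mem_map.mpr ⟨(k, v), this, rfl⟩

lemma stinv_step (st : PySem.Dict String String × PySem.Dict String Int × List String × Option String)
    (names : PySem.Dict String String) (seq : List String) (row : List Int)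
    (h : StInv st names seq) :
    StInv (stepA st row) (nameStep (names, seq) row).1 (nameStep (names, seq) row).2 := by
  obtain ⟨up, counts, order, base⟩ := st
  obtain ⟨h1, h2, h3, h4, h5, h6, h7⟩ := h
  dsimp only at h1 h2 h3 h4
  subst h1 h2 h3
  cases hg : up.get? (rowStr row) with
  | some name =>
    have hc : up.contains (rowStr row) = true := by
      cases hcc : up.contains (rowStr row)
      · rw [← PySem.Dict.get?_eq_none_iff_contains] at hcc; rw [hcc] at hg; cases hg
      · rfl
    have hmemv : name ∈ up.values := mem_values_of_get? up _ name hg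
    simp only [stepA, nameStep, hg, hc, Option.getD_some, Bool.true_eq_false, if_false]
    by_cases hcond : PySem.List.pyGet? (runComp seq) (-1) ≠ some name
    · simp only [if_pos hcond]
      refine ⟨rfl, (PySem.Dict.counter_append_singleton seq name).symm, ?_, h4, ?_, h6, h7⟩
      · rw [runComp_append, collapseStep_eq, if_pos hcond]
      · intro x hx
        rcases List.mem_append.mp hx with hx | hx
        · exact h5 x hx
        · simp at hx; subst hx; exact hmemv
    · simp only [if_neg hcond]
      refine ⟨rfl, (PySem.Dict.counter_append_singleton seq name).symm, ?_, h4, ?_, h6, h7⟩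
      · rw [runComp_append, collapseStep_eq, if_neg hcond]
      · intro x hx
        rcases List.mem_append.mp hx with hx | hx
        · exact h5 x hx
        · simp at hx; subst hx; exact hmemv
  | none =>
    have hc : up.contains (rowStr row) = false := (PySem.Dict.get?_eq_none_iff_contains up _).mp hg
    cases base with
    | none =>
      have hempty : up.items = [] := h4.mp rfl
      have hsz : up.size = 0 := by simp [PySem.Dict.size, hempty]
      have hvals : up.values = [] := by simp [PySem.Dict.values, hempty]
      have hseq : seq = [] := by
        cases hsq : seq with
        | nil => rfl
        | cons a t => exact absurd (h5 a (by simp [hsq])) (by simp [hvals])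
      subst hseq
      simp only [stepA, nameStep, hg, hc, hsz, reduceIte]
      refine ⟨rfl, (counter_snoc_fresh [] "b" (by simp)).symm,
        (runComp_snoc_fresh [] "b" (by simp)).symm, ?_, ?_, ?_, PySem.Dict.nodup_keys_insert up _ _ h7⟩
      · simp [PySem.Dict.items_insert_of_not_contains up _ hc]
      · intro x hx
        simp at hx; subst hx
        rw [values_insert_fresh up _ _ hc]
        simp
      · intro j hj
        rw [values_insert_fresh up _ _ hc, hvals] at hj
        simp at hj
        exact absurd hj (tName_ne_b j)
    | some b0 =>
      have hne : up.items ≠ [] := fun he => by cases (h4.mpr he)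
      have hsz : ¬ up.size = 0 := by
        simp [PySem.Dict.size, List.length_eq_zero_iff]; exact hne
      have hfresh : ("t" ++ PySem.Int.toStr (up.size : Int)) ∉ seq := by
        intro hmem
        exact absurd (h6 up.size (h5 _ hmem)) (by omega)
      simp only [stepA, nameStep, hg, hc, if_neg hsz, reduceIte]
      refine ⟨rfl, (counter_snoc_fresh seq _ hfresh).symm,
        (runComp_snoc_fresh seq _ hfresh).symm, ?_, ?_, ?_, PySem.Dict.nodup_keys_insert up _ _ h7⟩
      · simp [PySem.Dict.items_insert_of_not_contains up _ hc]
      · intro x hx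
        rw [values_insert_fresh up _ _ hc]
        rcases List.mem_append.mp hx with hx | hx
        · exact List.mem_append.mpr (Or.inl (h5 x hx))
        · simp at hx; subst hx; simp
      · intro j hj
        rw [values_insert_fresh up _ _ hc] at hj
        rw [PySem.Dict.size_insert, if_neg (by simp [hc])]
        rcases List.mem_append.mp hj with hj | hj
        · have := h6 j hj; omega
        · simp at hj
          have := toStr_natCast_inj j up.size hj
          omega

lemma stinv_fold (pattern : List (List Int)) :
    ∀ (st : PySem.Dict String String × PySem.Dict String Int × List String × Option String)
      (names : PySem.Dict String String) (seq : List String), StInv st names seq →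
    StInv (pattern.foldl stepA st) ((pattern.foldl nameStep (names, seq)).1) ((pattern.foldl nameStep (names, seq)).2) := by
  induction pattern with
  | nil => intro st names seq h; simpa using h
  | cons row rest ih =>
    intro st names seq h
    have := ih (stepA st row) (nameStep (names, seq) row).1 (nameStep (names, seq) row).2 (stinv_step st names seq row h)
    simpa using this

-- ===== VERDICT (by name: the statement is the Claim_ definition above) =====
theorem analyze_pattern_spec : Claim_equal_analyze_pattern := by
  intro pattern _
  unfold Spec_analyze_pattern
  have h0 : StInv (PySem.Dict.empty, PySem.Dict.empty, [], (none : Option String)) PySem.Dict.empty [] := by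
    refine ⟨rfl, rfl, rfl, by simp [PySem.Dict.empty], by simp, by simp [PySem.Dict.empty, PySem.Dict.values], by simp [PySem.Dict.empty, PySem.Dict.keys]⟩
  have h := stinv_fold pattern _ _ _ h0
  obtain ⟨h1, h2, h3, _, _, _, _⟩ := h
  unfold analyze_pattern analyze_pattern_alt
  have hcount : ((pattern.foldl nameStep (PySem.Dict.empty, [])).2).foldl countStep PySem.Dict.empty
      = PySem.Dict.counter ((pattern.foldl nameStep (PySem.Dict.empty, [])).2) := by
    rw [← PySem.Dict.foldl_insert_getD_add_one_eq_counter]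
    rfl
  simp only [hcount, ← h1, ← h2, h3, runComp]
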